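-- pv_equiv track=rewrite | github.com/heyhenry/python-problemsolving | June_2023/140623/Completed/column_sum.py | column_sum
-- ===== SOURCE A (Python) =====
-- def column_sum(mat : list[list[int]]) -> list[int]:
--
--     results = []
--
--     for col in range(len(mat[0])):
--         sum_value = 0
--         for row in range(len(mat)):
--             sum_value += mat[row][col]
--         results.append(sum_value)
--
--     return results
-- ===== SOURCE B (Python) =====
-- def column_sum(mat: list[list[int]]) -> list[int]:
--     results = [0] * len(mat[0])
--     for row in mat:
--         results = [s + row[col] for col, s in enumerate(results)]
--     return results
-- ===== Notes on version B (the rewrite author's own statement) =====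
-- stated objective: alternative
-- what changed: Row-major single sweep maintaining a vector of running column sums (rebuilt per row via enumerate), instead of an independent inner pass over all rows for each column.
import Mathlib
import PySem

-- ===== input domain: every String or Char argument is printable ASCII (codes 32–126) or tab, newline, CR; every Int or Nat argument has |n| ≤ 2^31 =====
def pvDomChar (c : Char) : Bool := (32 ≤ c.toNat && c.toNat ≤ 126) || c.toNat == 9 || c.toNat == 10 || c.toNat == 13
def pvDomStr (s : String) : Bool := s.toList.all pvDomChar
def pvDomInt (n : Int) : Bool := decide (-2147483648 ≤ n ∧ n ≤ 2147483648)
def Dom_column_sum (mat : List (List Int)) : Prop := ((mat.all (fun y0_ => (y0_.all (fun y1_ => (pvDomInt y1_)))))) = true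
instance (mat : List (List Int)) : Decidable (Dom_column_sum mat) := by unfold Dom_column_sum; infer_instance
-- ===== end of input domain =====

-- B sweeps row-major, maintaining a running vector of partial column sums, instead of A's
-- independent inner pass over all rows for each column (alternative decomposition, same cost).


-- ===== PORT A =====
def column_sum (mat : List (List Int)) : List Int :=
  (PySem.List.pyRange 0 ((PySem.List.pyGetD mat 0 []).length : Int) 1).foldl
    (fun results col =>
      results ++ [(PySem.List.pyRange 0 (mat.length : Int) 1).foldl
        (fun sum_value row => sum_value + PySem.List.pyGetD (PySem.List.pyGetD mat row []) col 0) 0])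
    []

-- ===== PORT B =====
def column_sum_alt (mat : List (List Int)) : List Int :=
  mat.foldl
    (fun results row =>
      (PySem.List.enumerate results).map (fun cs => cs.2 + PySem.List.pyGetD row cs.1 0))
    (List.replicate (PySem.List.pyGetD mat 0 []).length 0)

-- ===== PRECONDITION & SPEC =====
-- Pre_ excludes exactly the inputs where Python raises IndexError: the empty matrix (mat[0])
-- and ragged matrices with a row shorter than row 0 (mat[row][col]).
def Pre_column_sum (mat : List (List Int)) : Prop :=
  mat ≠ [] ∧ ∀ r ∈ mat, mat.headI.length ≤ r.length
instance (mat : List (List Int)) : Decidable (Pre_column_sum mat) := by unfold Pre_column_sum; infer_instance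
def pvWitness_column_sum : List (List Int) := [[1, 2], [3, 4], [5, 6]]
def Spec_column_sum (mat : List (List Int)) (out : List Int) : Prop := out = column_sum_alt mat
instance (mat : List (List Int)) (out : List Int) : Decidable (Spec_column_sum mat out) := by unfold Spec_column_sum; infer_instance

-- ===== CLAIM (what is proved, stated in full; the proofs are below) =====
def Claim_equal_column_sum : Prop := ∀ (mat : List (List Int)), Dom_column_sum mat → Pre_column_sum mat → Spec_column_sum mat (column_sum mat)

-- ===== LEMMAS AND PROOFS =====

-- column sum at column index c, as a plain list sum
def pvColSum (mat : List (List Int)) (c : Int) : Int :=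
  (mat.map (fun r => PySem.List.pyGetD r c 0)).sum

-- A computes, for each col in range(n), the fold over the rows — which is pvColSum.
lemma column_sum_eq_map (mat : List (List Int)) :
    column_sum mat =
      (PySem.List.pyRange 0 ((PySem.List.pyGetD mat 0 []).length : Int) 1).map
        (fun c => pvColSum mat c) := by
  unfold column_sum
  rw [PySem.List.foldl_append_singleton_eq_map]
  simp only [List.nil_append]
  refine List.map_congr_left (fun c _ => ?_)
  rw [PySem.List.foldl_pyRange_zero_pyGetD' mat ([] : List Int)
        (fun acc r => acc + PySem.List.pyGetD r c 0) 0]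
  simp [pvColSum, PySem.List.foldl_add]

-- one row step of B, applied to a vector given as a map over range(n)
lemma alt_step (n : Nat) (g : Int → Int) (row : List Int) :
    (PySem.List.enumerate ((PySem.List.pyRange 0 (n : Int) 1).map g)).map
        (fun cs => cs.2 + PySem.List.pyGetD row cs.1 0)
      = (PySem.List.pyRange 0 (n : Int) 1).map (fun c => g c + PySem.List.pyGetD row c 0) := by
  rw [PySem.List.enumerate_eq_map_pyRange _ (0 : Int)]
  simp only [PySem.List.len_eq]
  simp only [List.length_map, PySem.List.length_pyRange_one, Int.sub_zero, Int.toNat_natCast,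
    List.map_map]
  refine List.map_congr_left (fun c hc => ?_)
  rw [PySem.List.mem_pyRange_one] at hc
  simp only [Function.comp]
  rw [PySem.List.pyGetD_map_pyRange_of_nonneg g (n : Int) c 0 hc.1 hc.2]

-- the whole row loop of B, with an invariant generalised over the current vector
lemma alt_fold (n : Nat) (rows : List (List Int)) (g : Int → Int) :
    rows.foldl
        (fun results row =>
          (PySem.List.enumerate results).map (fun cs => cs.2 + PySem.List.pyGetD row cs.1 0))
        ((PySem.List.pyRange 0 (n : Int) 1).map g)
      = (PySem.List.pyRange 0 (n : Int) 1).map (fun c => g c + pvColSum rows c) := by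
  induction rows generalizing g with
  | nil => simp [pvColSum]
  | cons r rest ih =>
    simp only [List.foldl_cons]
    rw [alt_step n g r, ih (fun c => g c + PySem.List.pyGetD r c 0)]
    refine List.map_congr_left (fun c _ => ?_)
    simp [pvColSum, add_assoc]

lemma column_sum_alt_eq_map (mat : List (List Int)) :
    column_sum_alt mat =
      (PySem.List.pyRange 0 ((PySem.List.pyGetD mat 0 []).length : Int) 1).map
        (fun c => pvColSum mat c) := by
  unfold column_sum_alt
  have hrep : List.replicate (PySem.List.pyGetD mat 0 []).length (0 : Int)
      = (PySem.List.pyRange 0 ((PySem.List.pyGetD mat 0 []).length : Int) 1).map (fun _ => 0) := by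
    rw [List.map_const', PySem.List.length_pyRange_one]
    simp
  rw [hrep, alt_fold (PySem.List.pyGetD mat 0 []).length mat (fun _ => 0)]
  simp

-- ===== VERDICT (by name: the statement is the Claim_ definition above) =====
theorem column_sum_spec : Claim_equal_column_sum := by
  intro mat _ _
  unfold Spec_column_sum
  rw [column_sum_eq_map, column_sum_alt_eq_map]
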